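-- pv_equiv track=rewrite | github.com/nosleepcassette/skinwalker | src/skinwalker/hermes.py | _update_display_skin_in_config
-- ===== SOURCE A (Python) =====
-- def _update_display_skin_in_config(content: str, skin_name: str) -> str:
--     lines = content.splitlines()
--     display_index = next((index for index, line in enumerate(lines) if line.strip() == "display:"), -1)
--
--     if display_index == -1:
--         suffix = "" if not content or content.endswith("\n") else "\n"
--         return f"{content}{suffix}display:\n  skin: {skin_name}\n"
--
--     block_end = len(lines)
--     for index in range(display_index + 1, len(lines)):
--         line = lines[index]
--         if line and not line.startswith((" ", "#")) and ":" in line: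
--             block_end = index
--             break
--
--     for index in range(display_index + 1, block_end):
--         if lines[index].startswith("  skin:"):
--             lines[index] = f"  skin: {skin_name}"
--             return "\n".join(lines) + "\n"
--
--     lines.insert(display_index + 1, f"  skin: {skin_name}")
--     return "\n".join(lines) + "\n"
-- ===== SOURCE B (Python) =====
-- def _update_display_skin_in_config(content: str, skin_name: str) -> str:
--     new_line = f"  skin: {skin_name}"
--     it = iter(content.splitlines())
--     head = []
--     for line in it:
--         head.append(line)
--         if line.strip() == "display:":
--             break
--     else:
--         sep = "" if not content or content.endswith("\n") else "\n"
--         return f"{content}{sep}display:\n{new_line}\n"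
--     body = []
--     replaced = False
--     for line in it:
--         if line and not line.startswith((" ", "#")) and ":" in line:
--             body.append(line)
--             break
--         if not replaced and line.startswith("  skin:"):
--             body.append(new_line)
--             replaced = True
--         else:
--             body.append(line)
--     body.extend(it)
--     if not replaced:
--         body = [new_line] + body
--     return "\n".join(head + body) + "\n"
-- ===== Notes on version B (the rewrite author's own statement) =====
-- stated objective: simpler
-- what changed: Replaces A's staged index pipeline (next(...,-1) to find display:, a range loop computing block_end, a second range loop searching for the skin line, in-place lines[index] assignment and lines.insert) by a single streaming pass over a shared line iterator: one loop consumes lines into head until display:, a second fused loop both detects the block end and replaces the first skin line under a replaced flag, and the new line is prepended to the tail when no replacement happened; no indices, no block_end, no insert.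
import Mathlib
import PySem

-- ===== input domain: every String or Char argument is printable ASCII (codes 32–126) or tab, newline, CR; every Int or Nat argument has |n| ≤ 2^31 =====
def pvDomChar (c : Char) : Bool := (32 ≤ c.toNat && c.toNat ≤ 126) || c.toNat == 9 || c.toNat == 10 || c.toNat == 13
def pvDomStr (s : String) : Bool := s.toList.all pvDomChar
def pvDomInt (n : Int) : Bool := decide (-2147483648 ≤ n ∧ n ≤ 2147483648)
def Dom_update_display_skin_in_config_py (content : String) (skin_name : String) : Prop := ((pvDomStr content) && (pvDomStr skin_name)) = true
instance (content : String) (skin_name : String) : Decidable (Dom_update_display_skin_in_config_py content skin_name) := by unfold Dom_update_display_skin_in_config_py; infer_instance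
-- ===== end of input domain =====

-- B replaces A's staged index pipeline (find display index, compute block_end, second range
-- scan, in-place assignment / insert) by one streaming pass over a shared line iterator with a
-- replaced flag; same return value, objective: simpler.

-- ===== PORT A =====
-- the 'for index in range(display_index+1, len(lines))' loop computing block_end (break = return i)
def pvFindBlockEnd (lines : List String) : List Int → Int → Int
  | [], block_end => block_end
  | i :: rest, block_end =>
    let line := PySem.List.pyGetD lines i ""
    if !(line == "") && !(PySem.Str.startswith line " " || PySem.Str.startswith line "#")
        && PySem.Str.isIn ":" line then i
    else pvFindBlockEnd lines rest block_end

-- the 'for index in range(display_index+1, block_end)' loop (early return = some index)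
def pvFindSkinIdx (lines : List String) : List Int → Option Int
  | [] => none
  | i :: rest =>
    if PySem.Str.startswith (PySem.List.pyGetD lines i "") "  skin:" then some i
    else pvFindSkinIdx lines rest

def update_display_skin_in_config_py (content : String) (skin_name : String) : String :=
  let lines := PySem.Str.splitlines content
  let display_index : Int :=
    match (PySem.List.enumerate lines 0).find? (fun p => PySem.Str.strip p.2 == "display:") with
    | some p => p.1
    | none => -1
  if display_index == -1 then
    let suffix := if content == "" || PySem.Str.endswith content "\n" then "" else "\n"
    content ++ suffix ++ "display:\n  skin: " ++ skin_name ++ "\n"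
  else
    let block_end := pvFindBlockEnd lines
      (PySem.List.pyRange (display_index + 1) ((lines.length : Nat) : Int) 1) ((lines.length : Nat) : Int)
    match pvFindSkinIdx lines (PySem.List.pyRange (display_index + 1) block_end 1) with
    | some index =>
      -- lines[index] = f"  skin: {skin_name}": index is nonnegative here, so .toNat is exact
      PySem.Str.join "\n" (lines.set index.toNat ("  skin: " ++ skin_name)) ++ "\n"
    | none =>
      PySem.Str.join "\n" (PySem.List.insert lines (display_index + 1) ("  skin: " ++ skin_name)) ++ "\n"

-- ===== PORT B =====
-- first 'for line in it' loop: consume lines into head until display:; none = the for/else branch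
def pvHeadLoop : List String → List String → Option (List String × List String)
  | [], _ => none
  | l :: ls, head =>
    if PySem.Str.strip l == "display:" then some (head ++ [l], ls)
    else pvHeadLoop ls (head ++ [l])

-- second 'for line in it' loop fused with 'body.extend(it)': returns (body, replaced)
def pvBodyLoop (new_line : String) : List String → List String → Bool → List String × Bool
  | [], body, replaced => (body, replaced)
  | l :: ls, body, replaced =>
    if !(l == "") && !(PySem.Str.startswith l " " || PySem.Str.startswith l "#")
        && PySem.Str.isIn ":" l then (body ++ [l] ++ ls, replaced)
    else if !replaced && PySem.Str.startswith l "  skin:" then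
      pvBodyLoop new_line ls (body ++ [new_line]) true
    else pvBodyLoop new_line ls (body ++ [l]) replaced

def update_display_skin_in_config_py_alt (content : String) (skin_name : String) : String :=
  let new_line := "  skin: " ++ skin_name
  match pvHeadLoop (PySem.Str.splitlines content) [] with
  | none =>
    let sep := if content == "" || PySem.Str.endswith content "\n" then "" else "\n"
    content ++ sep ++ "display:\n" ++ new_line ++ "\n"
  | some (head, rest) =>
    let bp := pvBodyLoop new_line rest [] false
    let body := if !bp.2 then new_line :: bp.1 else bp.1
    PySem.Str.join "\n" (head ++ body) ++ "\n"

-- ===== PRECONDITION & SPEC =====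
def Spec_update_display_skin_in_config_py (content : String) (skin_name : String) (out : String) : Prop := out = update_display_skin_in_config_py_alt content skin_name
instance (content : String) (skin_name : String) (out : String) : Decidable (Spec_update_display_skin_in_config_py content skin_name out) := by unfold Spec_update_display_skin_in_config_py; infer_instance

-- ===== CLAIM (what is proved, stated in full; the proofs are below) =====
def Claim_equal_update_display_skin_in_config_py : Prop := ∀ (content : String) (skin_name : String), Dom_update_display_skin_in_config_py content skin_name → Spec_update_display_skin_in_config_py content skin_name (update_display_skin_in_config_py content skin_name)

-- ===== LEMMAS AND PROOFS =====

-- proof-side abstractions of the block scans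
def pvEndsBlock (line : String) : Bool :=
  !(line == "") && !(PySem.Str.startswith line " " || PySem.Str.startswith line "#")
    && PySem.Str.isIn ":" line

def pvCountLead : List String → Nat
  | [] => 0
  | l :: ls => if pvEndsBlock l then 0 else pvCountLead ls + 1

def pvFindSkinPos : List String → Option Nat
  | [] => none
  | b :: bs => if PySem.Str.startswith b "  skin:" then some 0 else (pvFindSkinPos bs).map (· + 1)

-- A's found-display branch as a function of the line list and display index
def pvAres (nl : String) (lines : List String) (di : Int) : String :=
  let block_end := pvFindBlockEnd lines
    (PySem.List.pyRange (di + 1) ((lines.length : Nat) : Int) 1) ((lines.length : Nat) : Int)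
  match pvFindSkinIdx lines (PySem.List.pyRange (di + 1) block_end 1) with
  | some index => PySem.Str.join "\n" (lines.set index.toNat nl) ++ "\n"
  | none => PySem.Str.join "\n" (PySem.List.insert lines (di + 1) nl) ++ "\n"

lemma pvCountLead_le (ls : List String) : pvCountLead ls ≤ ls.length := by
  induction ls with
  | nil => simp [pvCountLead]
  | cons l ls ih => simp only [pvCountLead]; split <;> simp; omega

lemma pvFindSkinPos_lt (bl : List String) : ∀ j, pvFindSkinPos bl = some j → j < bl.length := by
  induction bl with
  | nil => simp [pvFindSkinPos]
  | cons b bs ih =>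
    intro j hj
    simp only [pvFindSkinPos] at hj
    split at hj
    · cases hj; simp
    · rcases Option.map_eq_some_iff.mp hj with ⟨k, hk, rfl⟩
      have := ih k hk; simp; omega

lemma pvFBE (ls : List String) : ∀ pre : List String,
    pvFindBlockEnd (pre ++ ls)
      (PySem.List.pyRange ((pre.length : Nat) : Int) ((((pre ++ ls).length : Nat)) : Int) 1)
      (((pre ++ ls).length : Nat) : Int)
      = (pre.length : Int) + (pvCountLead ls : Int) := by
  induction ls with
  | nil =>
    intro pre
    rw [PySem.List.pyRange_one_eq_nil (by simp)]
    simp [pvFindBlockEnd, pvCountLead]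
  | cons a ls ih =>
    intro pre
    rw [PySem.List.pyRange_one_cons (by simp only [List.length_append, List.length_cons]; push_cast; omega)]
    have hline : PySem.List.pyGetD (pre ++ a :: ls) ((pre.length : Nat) : Int) "" = a := by
      simp [PySem.List.pyGetD_natCast]
    simp only [pvFindBlockEnd, hline, pvCountLead]
    by_cases h : pvEndsBlock a
    · simp only [pvEndsBlock] at h
      rw [if_pos h, if_pos (by simpa [pvEndsBlock] using h)]
      simp
    · simp only [pvEndsBlock] at h
      rw [if_neg h, if_neg (by simpa [pvEndsBlock] using h)]
      have h1 : pre ++ a :: ls = (pre ++ [a]) ++ ls := by simp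
      have h2 : ((pre.length : Int) + 1) = (((pre ++ [a]).length : Nat) : Int) := by simp
      rw [h1, h2, ih (pre ++ [a])]
      simp
      omega

lemma pvFSK (bl : List String) : ∀ (pre suf : List String),
    pvFindSkinIdx (pre ++ (bl ++ suf))
      (PySem.List.pyRange ((pre.length : Nat) : Int) (((pre.length + bl.length : Nat)) : Int) 1)
      = (pvFindSkinPos bl).map (fun j => (pre.length : Int) + (j : Int)) := by
  induction bl with
  | nil =>
    intro pre suf
    rw [PySem.List.pyRange_one_eq_nil (by simp)]
    simp [pvFindSkinIdx, pvFindSkinPos]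
  | cons b bl ih =>
    intro pre suf
    rw [PySem.List.pyRange_one_cons (by simp only [List.length_cons]; push_cast; omega)]
    have hline : PySem.List.pyGetD (pre ++ (b :: bl ++ suf)) ((pre.length : Nat) : Int) "" = b := by
      simp [PySem.List.pyGetD_natCast]
    simp only [pvFindSkinIdx, hline, pvFindSkinPos]
    by_cases h : PySem.Str.startswith b "  skin:"
    · rw [if_pos h, if_pos h]
      simp
    · rw [if_neg h, if_neg h]
      have h1 : pre ++ (b :: bl ++ suf) = (pre ++ [b]) ++ (bl ++ suf) := by simp
      have h2 : ((pre.length : Int) + 1) = (((pre ++ [b]).length : Nat) : Int) := by simp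
      have h3 : ((pre.length + (b :: bl).length : Nat) : Int) = (((pre ++ [b]).length + bl.length : Nat) : Int) := by
        simp; omega
      rw [h1, h2, h3, ih (pre ++ [b]) suf]
      cases hp : pvFindSkinPos bl <;> simp; omega

lemma pvCore (nl l : String) (head ls : List String) :
    pvAres nl (head ++ l :: ls) (head.length : Int) =
      PySem.Str.join "\n"
        (head ++ [l] ++
          (match pvFindSkinPos (ls.take (pvCountLead ls)) with
           | some j => (ls.take (pvCountLead ls)).set j nl
           | none => nl :: ls.take (pvCountLead ls)) ++ ls.drop (pvCountLead ls)) ++ "\n" := by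
  have hnle := pvCountLead_le ls
  have hsplit : head ++ l :: ls = (head ++ [l]) ++ ls := by simp
  simp only [pvAres, hsplit]
  have hlen1 : ((head.length : Int) + 1) = (((head ++ [l]).length : Nat) : Int) := by simp
  rw [hlen1, pvFBE ls (head ++ [l])]
  have hbd : (((head ++ [l]).length : Nat) : Int) + ((pvCountLead ls : Nat) : Int)
      = (((head ++ [l]).length + (ls.take (pvCountLead ls)).length : Nat) : Int) := by
    simp [List.length_take]; omega
  rw [hbd]
  have hls : (head ++ [l]) ++ ls
      = (head ++ [l]) ++ (ls.take (pvCountLead ls) ++ ls.drop (pvCountLead ls)) := by simp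
  rw [hls, pvFSK (ls.take (pvCountLead ls)) (head ++ [l]) (ls.drop (pvCountLead ls))]
  cases hp : pvFindSkinPos (ls.take (pvCountLead ls)) with
  | none =>
    rw [PySem.List.insert_natCast _ _ _ (by simp)]
    rw [List.take_left, List.drop_left]
    simp
  | some j =>
    have hj := pvFindSkinPos_lt _ _ hp
    simp only [Option.bind_eq_bind, Option.bind_some, Option.pure_def, Option.map_some]
    have hidx : ((((head ++ [l]).length : Nat) : Int) + (j : Int)).toNat
        = (head ++ [l]).length + j := by omega
    rw [hidx, List.set_append_right _ _ (by omega)]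
    rw [show (head ++ [l]).length + j - (head ++ [l]).length = j by omega]
    rw [List.set_append_left _ _ hj]
    simp

-- pvBodyLoop with replaced = true just copies the rest
lemma pvBody_true (nl : String) (ls : List String) : ∀ body,
    pvBodyLoop nl ls body true = (body ++ ls, true) := by
  induction ls with
  | nil => intro body; simp [pvBodyLoop]
  | cons l ls ih =>
    intro body
    simp only [pvBodyLoop]
    split
    · simp
    · simp only [Bool.false_and, Bool.not_true]
      rw [if_neg (by simp), ih (body ++ [l])]
      simp

-- characterisation of pvBodyLoop starting with replaced = false
lemma pvBody_char (nl : String) (ls : List String) : ∀ body,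
    pvBodyLoop nl ls body false =
      (match pvFindSkinPos (ls.take (pvCountLead ls)) with
       | some j => (body ++ ls.set j nl, true)
       | none => (body ++ ls, false)) := by
  induction ls with
  | nil => intro body; simp [pvBodyLoop, pvCountLead, pvFindSkinPos]
  | cons l ls ih =>
    intro body
    simp only [pvBodyLoop, pvCountLead]
    by_cases he : (!(l == "") && !(PySem.Str.startswith l " " || PySem.Str.startswith l "#")
        && PySem.Str.isIn ":" l) = true
    · have he2 : pvEndsBlock l = true := he
      rw [if_pos he, if_pos he2]
      simp [pvFindSkinPos]
    · have he2 : ¬ pvEndsBlock l = true := he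
      rw [if_neg he, if_neg he2]
      by_cases hs : PySem.Str.startswith l "  skin:"
      · rw [if_pos (by simpa using hs)]
        rw [pvBody_true nl ls (body ++ [nl])]
        simp only [List.take_succ_cons, pvFindSkinPos]
        rw [if_pos hs]
        simp
      · rw [if_neg (by simpa using hs)]
        rw [ih (body ++ [l])]
        simp only [List.take_succ_cons, pvFindSkinPos]
        rw [if_neg hs]
        cases hp : pvFindSkinPos (ls.take (pvCountLead ls)) <;> simp

-- main correspondence: the alt head loop + body loop equal A's found-branch on the display line
set_option maxRecDepth 4000 in
lemma pvKey (nl : String) (ls : List String) : ∀ head : List String,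
    (match pvHeadLoop ls head with
     | none => none
     | some (h, rest) =>
       let bp := pvBodyLoop nl rest [] false
       let body := if !bp.2 then nl :: bp.1 else bp.1
       some (PySem.Str.join "\n" (h ++ body) ++ "\n")) =
      (match (PySem.List.enumerate ls (head.length : Int)).find?
          (fun p => PySem.Str.strip p.2 == "display:") with
       | some p => some (pvAres nl (head ++ ls) p.1)
       | none => none) := by
  induction ls with
  | nil => intro head; simp [pvHeadLoop, PySem.List.enumerate_nil]
  | cons l ls ih =>
    intro head
    rw [PySem.List.enumerate_cons]
    by_cases h : PySem.Str.strip l == "display:"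
    · rw [List.find?_cons_of_pos (by simpa using h)]
      simp only [pvHeadLoop, if_pos h]
      rw [pvCore nl l head ls]
      rw [pvBody_char nl ls []]
      have hnle := pvCountLead_le ls
      cases hp : pvFindSkinPos (ls.take (pvCountLead ls)) with
      | some j =>
        have hj := pvFindSkinPos_lt _ _ hp
        have hset : ls.set j nl = (ls.take (pvCountLead ls)).set j nl ++ ls.drop (pvCountLead ls) := by
          conv_lhs => rw [← List.take_append_drop (pvCountLead ls) ls]
          rw [List.set_append_left _ _ hj]
        dsimp only
        simp only [Bool.not_true, Bool.false_eq_true, if_false, List.nil_append, hset,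
          List.append_assoc, List.cons_append]
      | none =>
        dsimp only
        simp only [Bool.not_false, List.nil_append, Option.some.injEq]
        rw [if_pos trivial]
        rw [show head ++ [l] ++ (nl :: ls.take (pvCountLead ls)) ++ ls.drop (pvCountLead ls)
            = head ++ [l] ++ (nl :: (ls.take (pvCountLead ls) ++ ls.drop (pvCountLead ls))) by
          simp [List.append_assoc]]
        rw [List.take_append_drop]
    · rw [List.find?_cons_of_neg (by simpa using h)]
      simp only [pvHeadLoop]
      rw [if_neg h]
      have h2 : ((head.length : Int) + 1) = (((head ++ [l]).length : Nat) : Int) := by simp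
      rw [h2, ih (head ++ [l])]
      have h1 : head ++ l :: ls = (head ++ [l]) ++ ls := by simp
      rw [h1]

-- ===== VERDICT (by name: the statement is the Claim_ definition above) =====
theorem update_display_skin_in_config_py_spec : Claim_equal_update_display_skin_in_config_py := by
  intro content skin_name _
  show update_display_skin_in_config_py content skin_name
      = update_display_skin_in_config_py_alt content skin_name
  unfold update_display_skin_in_config_py update_display_skin_in_config_py_alt
  have hkey := pvKey ("  skin: " ++ skin_name) (PySem.Str.splitlines content) []
  rw [show ((0 : Int)) = ((([] : List String).length : Nat) : Int) by simp]
  dsimp only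
  cases hf : (PySem.List.enumerate (PySem.Str.splitlines content) ((([] : List String).length : Nat) : Int)).find?
      (fun p => PySem.Str.strip p.2 == "display:") with
  | none =>
    rw [hf] at hkey
    cases hh : pvHeadLoop (PySem.Str.splitlines content) [] with
    | some pr => rw [hh] at hkey; simp at hkey
    | none =>
      have lit : ("display:\n" ++ "  skin: " : String) = "display:\n  skin: " := by decide
      have merge : ∀ r : String, "display:\n" ++ ("  skin: " ++ r) = "display:\n  skin: " ++ r := by
        intro r
        rw [← String.append_assoc, lit]
      simp only [String.append_assoc]
      rw [merge, if_pos (show ((-1 : Int) == -1) = true from rfl)]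
  | some p =>
    have hmem := List.mem_of_find?_eq_some hf
    obtain ⟨k, hk, hpk⟩ := (PySem.List.mem_enumerate_iff _ _ _).mp hmem
    have hne : (p.1 == (-1 : Int)) = false := by
      subst hpk; simp
    rw [hf] at hkey
    simp only [hne, Bool.false_eq_true, if_false]
    cases hh : pvHeadLoop (PySem.Str.splitlines content) [] with
    | none => rw [hh] at hkey; simp at hkey
    | some pr =>
      rw [hh] at hkey
      simp only [List.nil_append] at hkey ⊢
      exact (Option.some_inj.mp hkey).symm
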